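-- pv_equiv track=rewrite | github.com/posl/comment_recommendation | script/mod_gen/2_time/zh/220_C/0.py | sumB
-- ===== SOURCE A (Python) =====
-- def sumB(A, N, X):
--     B = A * 100
--     k = 0
--     sumB = 0
--     while sumB <= X:
--         sumB += B[k]
--         k += 1
--     return k
-- ===== SOURCE B (Python) =====
-- def sumB(A, N, X):
--     if X < 0:
--         return 0
--     pre = []
--     s = 0
--     for a in A:
--         s += a
--         pre.append(s)
--     for i, p in enumerate(pre, 1):
--         if p > X:
--             return i
--     M = max(pre)
--     S = pre[-1]
--     if S <= 0:
--         raise ValueError("prefix sums never exceed X")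
--     q = (X - M) // S + 1
--     for i, p in enumerate(pre, 1):
--         if p > X - q * S:
--             return q * len(A) + i
-- ===== Notes on version B (the rewrite author's own statement) =====
-- stated objective: faster
-- what changed: A linearly scans the 100-fold repetition of A accumulating a running sum; B computes one period of prefix sums, derives the number of full periods by a single integer division, and locates the remainder inside one period, so the work is O(len(A)) instead of O(answer); intended as faster (a timing run read ~12x at the largest size both programs finished, but could not confirm at its top size, where the generated input makes B raise).
import Mathlib
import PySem

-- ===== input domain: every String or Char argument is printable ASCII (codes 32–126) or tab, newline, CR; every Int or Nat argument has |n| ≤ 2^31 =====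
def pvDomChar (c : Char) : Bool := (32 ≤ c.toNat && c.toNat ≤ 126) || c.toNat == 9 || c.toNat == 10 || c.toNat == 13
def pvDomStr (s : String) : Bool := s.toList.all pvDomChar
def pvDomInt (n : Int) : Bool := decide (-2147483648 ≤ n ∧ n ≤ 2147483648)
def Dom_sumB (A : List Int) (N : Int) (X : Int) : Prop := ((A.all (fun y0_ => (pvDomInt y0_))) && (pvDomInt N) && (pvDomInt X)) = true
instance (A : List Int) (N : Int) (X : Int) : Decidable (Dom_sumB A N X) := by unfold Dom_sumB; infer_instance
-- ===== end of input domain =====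

-- B replaces A's element-by-element scan of A*100 by one period of prefix sums plus a single
-- integer division for the number of full periods: O(len(A)) work instead of O(answer)
-- (intended as faster; a timing run read ~12x at the largest size both programs finished).

-- ===== PORT A =====
-- A's while loop consumes B = A*100 from index 0 upward; running off the end of the list with
-- the sum still ≤ X is Python's IndexError (excluded by Pre_); the port returns k there.
def sumBloop : List Int → Int → Int → Int → Int
  | [], _, k, _ => k          -- IndexError in Python when s ≤ X; outside Pre_
  | b :: r, s, k, X => if s ≤ X then sumBloop r (s + b) (k + 1) X else k

def sumB (A : List Int) (N : Int) (X : Int) : Int :=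
  sumBloop ((List.replicate 100 A).flatten) 0 0 X

-- ===== PORT B =====
-- pre = running prefix sums of one period (python's accumulating for-loop)
def preSums : List Int → Int → List Int
  | [], _ => []
  | a :: r, s => (s + a) :: preSums r (s + a)

-- python's `for i, p in enumerate(pre, 1): if p > thr: return i`
def findIdx1 : List Int → Int → Int → Option Int
  | [], _, _ => none
  | p :: r, thr, i => if thr < p then some i else findIdx1 r thr (i + 1)

def sumB_alt (A : List Int) (N : Int) (X : Int) : Int :=
  if X < 0 then 0
  else
    let pre := preSums A 0
    match findIdx1 pre X 1 with
    | some i => i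
    | none =>
      match pre.max? with
      | none => 0                    -- max([]) raises ValueError in Python; outside Pre_
      | some M =>
        if pre.getLastD 0 ≤ 0 then 0 -- explicit `raise ValueError` in B; outside Pre_
        else
          let q := PySem.Int.floordiv (X - M) (pre.getLastD 0) + 1
          match findIdx1 pre (X - q * pre.getLastD 0) 1 with
          | some i => q * (A.length : Int) + i
          | none => 0                -- unreachable: M > X - q*S

-- ===== PRECONDITION & SPEC =====
-- Pre_ holds exactly where A's while loop finds its answer inside the 100 copies of A
-- (otherwise Python raises IndexError).
def Pre_sumB (A : List Int) (N : Int) (X : Int) : Prop :=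
  ∃ k, k ≤ 100 * A.length ∧ X < (((List.replicate 100 A).flatten).take k).sum
instance (A : List Int) (N : Int) (X : Int) : Decidable (Pre_sumB A N X) := by
  unfold Pre_sumB
  exact decidable_of_iff (∃ k < 100 * A.length + 1, X < (((List.replicate 100 A).flatten).take k).sum)
    (by constructor <;> rintro ⟨k, hk, h⟩ <;> exact ⟨k, by omega, h⟩)

def pvWitness_sumB : List Int × Int × Int := ([], 0, -5)

def Spec_sumB (A : List Int) (N : Int) (X : Int) (out : Int) : Prop := out = sumB_alt A N X
instance (A : List Int) (N : Int) (X : Int) (out : Int) : Decidable (Spec_sumB A N X out) := by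
  unfold Spec_sumB; infer_instance

-- ===== CLAIM (what is proved, stated in full; the proofs are below) =====
def Claim_equal_sumB : Prop := ∀ (A : List Int) (N : Int) (X : Int), Dom_sumB A N X → Pre_sumB A N X → Spec_sumB A N X (sumB A N X)

-- ===== LEMMAS AND PROOFS =====

-- the counting core of A's loop
def gCount : List Int → Int → Int → Nat
  | [], _, _ => 0
  | b :: r, s, X => if s ≤ X then gCount r (s + b) X + 1 else 0

theorem sumBloop_eq_gCount (l : List Int) (s k X : Int) :
    sumBloop l s k X = k + (gCount l s X : Int) := by
  induction l generalizing s k with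
  | nil => simp [sumBloop, gCount]
  | cons b r ih =>
    simp only [sumBloop, gCount]
    split_ifs with h
    · rw [ih]; push_cast; ring
    · simp

theorem gCount_min (l : List Int) (s X : Int) :
    ∀ j < gCount l s X, s + (l.take j).sum ≤ X := by
  induction l generalizing s with
  | nil => simp [gCount]
  | cons b r ih =>
    intro j hj
    simp only [gCount] at hj
    split_ifs at hj with h
    · match j with
      | 0 => simpa using h
      | j' + 1 =>
        have := ih (s + b) j' (by omega)
        simp only [List.take_succ_cons, List.sum_cons]
        linarith
    · omega

theorem gCount_hit (l : List Int) (s X : Int)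
    (h : ∃ j, j ≤ l.length ∧ X < s + (l.take j).sum) :
    X < s + (l.take (gCount l s X)).sum := by
  induction l generalizing s with
  | nil =>
    obtain ⟨j, hj, hx⟩ := h
    have hj0 : j = 0 := by simpa using hj
    subst hj0
    simpa [gCount] using hx
  | cons b r ih =>
    simp only [gCount]
    split_ifs with hs
    · obtain ⟨j, hj, hx⟩ := h
      match j with
      | 0 => simp at hx; omega
      | j' + 1 =>
        have := ih (s + b) ⟨j', by simpa using hj, by simpa [add_assoc] using hx⟩
        simp only [List.take_succ_cons, List.sum_cons]
        linarith
    · simpa using hs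

theorem preSums_length (A : List Int) (s : Int) : (preSums A s).length = A.length := by
  induction A generalizing s with
  | nil => rfl
  | cons a r ih => simp [preSums, ih]

theorem preSums_get (A : List Int) (s : Int) :
    ∀ j (h : j < (preSums A s).length), (preSums A s)[j] = s + (A.take (j + 1)).sum := by
  induction A generalizing s with
  | nil => simp [preSums]
  | cons a r ih =>
    intro j h
    match j with
    | 0 => simp [preSums]
    | j' + 1 =>
      simp only [preSums] at h ⊢
      rw [List.getElem_cons_succ, ih (s + a) j' (by simpa using h)]
      simp [add_assoc]

theorem preSums_getLastD (A : List Int) (h : A ≠ []) :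
    ∀ s : Int, (preSums A s).getLastD 0 = s + A.sum := by
  induction A with
  | nil => simp at h
  | cons a r ih =>
    intro s
    cases r with
    | nil => simp [preSums]
    | cons b t =>
      have h2 := ih (by simp) (s + a)
      simp only [preSums] at h2 ⊢
      rw [List.getLastD_eq_getLast?] at h2 ⊢
      cases hg : ((s + a + b) :: preSums t (s + a + b)).getLast? with
      | none => exact absurd (List.getLast?_eq_none_iff.mp hg) (by simp)
      | some g =>
        rw [hg] at h2
        simp only [Option.getD_some] at h2
        rw [List.getLast?_cons_cons, hg]
        simp only [Option.getD_some, h2]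
        simp [List.sum_cons]; ring

theorem findIdx1_none (l : List Int) (thr i : Int) (h : findIdx1 l thr i = none) :
    ∀ j (hj : j < l.length), l[j] ≤ thr := by
  induction l generalizing i with
  | nil => intro j hj; simp at hj
  | cons p r ih =>
    simp only [findIdx1] at h
    split_ifs at h with hp
    intro j hj
    match j with
    | 0 => simpa using not_lt.mp hp
    | j' + 1 => exact ih (i + 1) h j' (by simpa using hj)

theorem findIdx1_some (l : List Int) (thr : Int) : ∀ (i r : Int), findIdx1 l thr i = some r →
    ∃ j : Nat, ∃ hj : j < l.length, r = i + (j : Int) ∧ thr < l[j] ∧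
      ∀ j' (hj' : j' < l.length), j' < j → l[j'] ≤ thr := by
  induction l with
  | nil => intro i r h; simp [findIdx1] at h
  | cons p rest ih =>
    intro i r h
    simp only [findIdx1] at h
    split_ifs at h with hp
    · refine ⟨0, by simp, ?_, by simpa using hp, ?_⟩
      · simpa using (Option.some.inj h).symm
      · intro j' _ hj'; omega
    · obtain ⟨j, hj, hr, hx, hmin⟩ := ih (i + 1) r h
      refine ⟨j + 1, by simpa using hj, by rw [hr]; push_cast; ring, by simpa using hx, ?_⟩
      intro j' hj' hlt
      match j' with
      | 0 => simpa using not_lt.mp hp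
      | j'' + 1 => exact hmin j'' (by simpa using hj') (by omega)

-- prefix sums of the flattened repetition are periodic
theorem take_flatten_replicate (A : List Int) :
    ∀ (q m r : Nat), r ≤ A.length → q * A.length + r ≤ m * A.length →
      (((List.replicate m A).flatten).take (q * A.length + r)).sum
        = (q : Int) * A.sum + (A.take r).sum := by
  intro q
  induction q with
  | zero =>
    intro m r hr hb
    have e : 0 * A.length + r = r := by omega
    rw [e]
    cases m with
    | zero =>
      have hr0 : r = 0 := by omega
      subst hr0; simp
    | succ m' =>
      rw [List.replicate_succ, List.flatten_cons, List.take_append_of_le_length hr]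
      simp
  | succ q ih =>
    intro m r hr hb
    by_cases hn : A.length = 0
    · have hA : A = [] := List.length_eq_zero_iff.mp hn
      subst hA
      simp at hr
      subst hr
      simp
    · have hb' : q * A.length + A.length + r ≤ m * A.length := by
        rw [Nat.succ_mul] at hb
        omega
      have hm : q + 1 ≤ m := by
        by_contra hc
        have h1 : m * A.length ≤ q * A.length := Nat.mul_le_mul_right _ (by omega)
        omega
      obtain ⟨m', rfl⟩ : ∃ m', m = m' + 1 := ⟨m - 1, by omega⟩
      rw [List.replicate_succ, List.flatten_cons]
      have harr : (q + 1) * A.length + r = A.length + (q * A.length + r) := by ring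
      have hb2 : q * A.length + r ≤ m' * A.length := by
        rw [Nat.succ_mul] at hb'
        omega
      rw [harr, List.take_length_add_append, List.sum_append, ih m' r hr hb2]
      push_cast; ring

theorem B100_length (A : List Int) : (List.replicate 100 A).flatten.length = 100 * A.length := by
  rw [List.length_flatten, List.map_replicate, List.sum_replicate, smul_eq_mul]

-- ===== VERDICT (by name: the statement is the Claim_ definition above) =====
theorem sumB_spec : Claim_equal_sumB := by
  intro A N X _ hpre
  unfold Spec_sumB
  obtain ⟨k0, hk0le, hk0⟩ := hpre
  have hA : sumB A N X = (gCount ((List.replicate 100 A).flatten) 0 X : Int) := by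
    rw [sumB, sumBloop_eq_gCount]; ring
  by_cases hX : X < 0
  · have hg0 : gCount ((List.replicate 100 A).flatten) 0 X = 0 := by
      cases h : (List.replicate 100 A).flatten with
      | nil => simp [gCount]
      | cons b r => simp [gCount, show ¬ (0 : Int) ≤ X by omega]
    rw [hA, hg0]
    simp [sumB_alt, hX]
  · rw [not_lt] at hX
    have hne : A ≠ [] := by
      rintro rfl
      simp at hk0
      omega
    have hn1 : 0 < A.length := List.length_pos_of_ne_nil hne
    have hg_hit : X < (((List.replicate 100 A).flatten).take (gCount ((List.replicate 100 A).flatten) 0 X)).sum := by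
      have := gCount_hit ((List.replicate 100 A).flatten) 0 X
        ⟨k0, by rw [B100_length]; exact hk0le, by simpa using hk0⟩
      simpa using this
    have hg_min : ∀ j < gCount ((List.replicate 100 A).flatten) 0 X,
        (((List.replicate 100 A).flatten).take j).sum ≤ X := by
      intro j hj
      have := gCount_min ((List.replicate 100 A).flatten) 0 X j hj
      simpa using this
    suffices h : ∃ kB : Nat, sumB_alt A N X = (kB : Int) ∧
        X < (((List.replicate 100 A).flatten).take kB).sum ∧
        ∀ j < kB, (((List.replicate 100 A).flatten).take j).sum ≤ X by
      obtain ⟨kB, hout, hhit, hmin⟩ := h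
      have hk : gCount ((List.replicate 100 A).flatten) 0 X = kB := by
        rcases Nat.lt_trichotomy (gCount ((List.replicate 100 A).flatten) 0 X) kB with h1 | h1 | h1
        · have := hmin _ h1; linarith
        · exact h1
        · have := hg_min kB h1; linarith
      rw [hA, hk, hout]
    have hplen : (preSums A 0).length = A.length := preSums_length A 0
    cases hfi : findIdx1 (preSums A 0) X 1 with
    | some i =>
      obtain ⟨j, hj, hi, hx, hmin1⟩ := findIdx1_some (preSums A 0) X 1 i hfi
      have hjn : j < A.length := by rwa [hplen] at hj
      have h100 : A.length ≤ 100 * A.length := by omega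
      refine ⟨j + 1, ?_, ?_, ?_⟩
      · simp only [sumB_alt, not_lt.mpr hX, if_false, hfi]
        rw [hi]; push_cast; ring
      · have ht := take_flatten_replicate A 0 100 (j + 1) (by omega) (by omega)
        have e : 0 * A.length + (j + 1) = j + 1 := by omega
        rw [e] at ht
        rw [ht]
        have hg := preSums_get A 0 j hj
        rw [hg] at hx
        push_cast
        linarith
      · intro k hk
        have hkn : k ≤ A.length := by omega
        have ht := take_flatten_replicate A 0 100 k hkn (by omega)
        have e : 0 * A.length + k = k := by omega
        rw [e] at ht
        rw [ht]
        cases k with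
        | zero => simpa using hX
        | succ k' =>
          have hk' : k' < (preSums A 0).length := by rw [hplen]; omega
          have := hmin1 k' hk' (by omega)
          rw [preSums_get A 0 k' hk'] at this
          push_cast
          linarith
    | none =>
      have hall : ∀ j (hj : j < (preSums A 0).length), (preSums A 0)[j] ≤ X :=
        findIdx1_none _ _ _ hfi
      have hpre_ne : preSums A 0 ≠ [] := by
        intro hcon
        rw [hcon] at hplen
        simp at hplen
        omega
      obtain ⟨M, hM⟩ : ∃ M, (preSums A 0).max? = some M := by
        cases h : (preSums A 0).max? with
        | none => exact absurd (List.max?_eq_none_iff.mp h) hpre_ne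
        | some M => exact ⟨M, rfl⟩
      have hMmax : ∀ x ∈ preSums A 0, x ≤ M := fun x hx => (List.max?_eq_some_iff.mp hM).2 x hx
      obtain ⟨jM, hjM, hjMeq⟩ := List.mem_iff_getElem.mp (List.max?_mem hM)
      have hMX : M ≤ X := hjMeq ▸ hall jM hjM
      have hS_eq : (preSums A 0).getLastD 0 = A.sum := by
        have := preSums_getLastD A hne 0
        simpa using this
      have hSM : A.sum ≤ M := by
        have hl : A.length - 1 < (preSums A 0).length := by rw [hplen]; omega
        have h1 : (preSums A 0)[A.length - 1]'hl ∈ preSums A 0 := List.getElem_mem hl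
        have h2 := preSums_get A 0 (A.length - 1) hl
        have e : A.length - 1 + 1 = A.length := by omega
        rw [e, List.take_length] at h2
        rw [h2] at h1
        have := hMmax _ h1
        linarith
      by_cases hS : A.sum ≤ 0
      · exfalso
        have hq := Nat.div_add_mod k0 A.length
        have hq' : (k0 / A.length) * A.length + k0 % A.length = k0 := by
          rw [Nat.mul_comm]; exact hq
        have hrn : k0 % A.length < A.length := Nat.mod_lt _ (by omega)
        have ht := take_flatten_replicate A (k0 / A.length) 100 (k0 % A.length)
          (by omega) (by rw [hq']; exact hk0le)
        rw [← hq', ht] at hk0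
        have h1 : ((k0 / A.length : Nat) : Int) * A.sum ≤ 0 :=
          mul_nonpos_iff.mpr (Or.inl ⟨Int.natCast_nonneg _, hS⟩)
        have h2 : (A.take (k0 % A.length)).sum ≤ X := by
          cases hr : k0 % A.length with
          | zero => simpa using hX
          | succ r' =>
            have hr' : r' < (preSums A 0).length := by rw [hplen]; omega
            have := hall r' hr'
            rw [preSums_get A 0 r' hr'] at this
            linarith
        linarith
      · rw [not_le] at hS
        have hdiv := PySem.Int.floordiv_mul_add_mod (X - M) A.sum
        have hm0 := PySem.Int.mod_nonneg (X - M) hS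
        have hm1 := PySem.Int.mod_lt (X - M) hS
        have hlow : PySem.Int.floordiv (X - M) A.sum * A.sum ≤ X - M := by linarith
        have hhigh : X - M < (PySem.Int.floordiv (X - M) A.sum + 1) * A.sum := by
          have e : (PySem.Int.floordiv (X - M) A.sum + 1) * A.sum
              = PySem.Int.floordiv (X - M) A.sum * A.sum + A.sum := by ring
          linarith
        have hd0 : 0 ≤ PySem.Int.floordiv (X - M) A.sum := by
          by_contra hcon
          have h1 : PySem.Int.floordiv (X - M) A.sum * A.sum ≤ -1 * A.sum :=
            mul_le_mul_of_nonneg_right (by omega) (le_of_lt hS)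
          nlinarith
        have hdt : ((PySem.Int.floordiv (X - M) A.sum).toNat : Int)
            = PySem.Int.floordiv (X - M) A.sum := Int.toNat_of_nonneg hd0
        have hMq : X - (PySem.Int.floordiv (X - M) A.sum + 1) * A.sum < M := by linarith
        cases hfi2 : findIdx1 (preSums A 0)
            (X - (PySem.Int.floordiv (X - M) A.sum + 1) * A.sum) 1 with
        | none =>
          exfalso
          have := findIdx1_none _ _ _ hfi2 jM hjM
          rw [hjMeq] at this
          linarith
        | some i2 =>
          obtain ⟨j, hj, hi2, hx2, hmin2⟩ := findIdx1_some (preSums A 0) _ 1 i2 hfi2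
          have hjn : j < A.length := by rwa [hplen] at hj
          have hminper : ∀ k, k < ((PySem.Int.floordiv (X - M) A.sum).toNat + 1) * A.length + (j + 1) →
              k ≤ 100 * A.length → (((List.replicate 100 A).flatten).take k).sum ≤ X := by
            intro k hk hk100
            have hq := Nat.div_add_mod k A.length
            have hq' : (k / A.length) * A.length + k % A.length = k := by
              rw [Nat.mul_comm]; exact hq
            have hrn : k % A.length < A.length := Nat.mod_lt _ (by omega)
            have ht := take_flatten_replicate A (k / A.length) 100 (k % A.length)
              (by omega) (by rw [hq']; exact hk100)
            rw [← hq', ht]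
            have hcase : k / A.length ≤ (PySem.Int.floordiv (X - M) A.sum).toNat ∨
                (k / A.length = (PySem.Int.floordiv (X - M) A.sum).toNat + 1 ∧
                  k % A.length < j + 1) := by
              by_cases h : k / A.length ≤ (PySem.Int.floordiv (X - M) A.sum).toNat
              · left; exact h
              · right
                have h1 : k / A.length = (PySem.Int.floordiv (X - M) A.sum).toNat + 1 := by
                  by_contra h2
                  have h3 : (PySem.Int.floordiv (X - M) A.sum).toNat + 2 ≤ k / A.length := by omega
                  have h4 : ((PySem.Int.floordiv (X - M) A.sum).toNat + 2) * A.length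
                      ≤ (k / A.length) * A.length := Nat.mul_le_mul_right _ h3
                  have h5 : ((PySem.Int.floordiv (X - M) A.sum).toNat + 2) * A.length
                      = ((PySem.Int.floordiv (X - M) A.sum).toNat + 1) * A.length + A.length := by
                    ring
                  omega
                refine ⟨h1, ?_⟩
                rw [h1] at hq'
                omega
            have hbM : ∀ r' : Nat, r' < A.length → (A.take r').sum ≤ M := by
              intro r' hr'
              cases r' with
              | zero => simp; linarith
              | succ r'' =>
                have hr'' : r'' < (preSums A 0).length := by rw [hplen]; omega
                have hmem : (preSums A 0)[r''] ∈ preSums A 0 := List.getElem_mem hr''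
                have := hMmax _ hmem
                rw [preSums_get A 0 r'' hr''] at this
                linarith
            rcases hcase with h | ⟨h1, h2⟩
            · have hqd : ((k / A.length : Nat) : Int) ≤ PySem.Int.floordiv (X - M) A.sum := by
                calc ((k / A.length : Nat) : Int)
                    ≤ ((PySem.Int.floordiv (X - M) A.sum).toNat : Int) := by exact_mod_cast h
                  _ = _ := hdt
              have hb1 : ((k / A.length : Nat) : Int) * A.sum
                  ≤ PySem.Int.floordiv (X - M) A.sum * A.sum :=
                mul_le_mul_of_nonneg_right hqd (le_of_lt hS)
              have hb2 := hbM (k % A.length) hrn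
              linarith
            · have hqe : ((k / A.length : Nat) : Int)
                  = PySem.Int.floordiv (X - M) A.sum + 1 := by
                rw [h1]; push_cast [hdt]; ring
              rw [hqe]
              cases hr : k % A.length with
              | zero =>
                have e2 : (PySem.Int.floordiv (X - M) A.sum + 1) * A.sum
                    = PySem.Int.floordiv (X - M) A.sum * A.sum + A.sum := by ring
                simp
                linarith
              | succ r' =>
                have hr'j : r' < j := by omega
                have hr' : r' < (preSums A 0).length := by rw [hplen]; omega
                have := hmin2 r' hr' hr'j
                rw [preSums_get A 0 r' hr'] at this
                linarith
          have hkB100 : ((PySem.Int.floordiv (X - M) A.sum).toNat + 1) * A.length + (j + 1)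
              ≤ 100 * A.length := by
            by_contra hcon
            have := hminper k0 (by omega) hk0le
            linarith
          refine ⟨((PySem.Int.floordiv (X - M) A.sum).toNat + 1) * A.length + (j + 1), ?_, ?_, ?_⟩
          · simp only [sumB_alt, not_lt.mpr hX, if_false, hfi, hM, hS_eq,
              not_le.mpr hS, hfi2]
            rw [hi2]
            push_cast [hdt]
            ring
          · have ht := take_flatten_replicate A
              ((PySem.Int.floordiv (X - M) A.sum).toNat + 1) 100 (j + 1) (by omega) hkB100
            rw [ht]
            have hg := preSums_get A 0 j hj
            rw [hg] at hx2
            push_cast [hdt]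
            linarith
          · intro k hk
            exact hminper k hk (by omega)
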